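-- pv_equiv track=rewrite | github.com/erfiaco/Motor_para_bobinadora | Posicionador/Pos1.py | generate_steps_matrix
-- ===== SOURCE A (Python) =====
-- def generate_steps_matrix(positions):
--     """
--     Genera una matriz con el número de pasos necesarios y la dirección para alcanzar
--     cada posición objetivo desde la posición actual.
--
--     :param positions: Lista de posiciones en el eje X.
--     :return: Lista de listas (matriz) con pasos y direcciones.
--     """
--     current_position = 0
--     steps_matrix = []
--
--     for target_position in positions:
--         steps = abs(target_position - current_position)
--         direction = 1 if target_position > current_position else 0
--         steps_matrix.append([steps, direction])
--         current_position = target_position  # Actualiza la posición actual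
--
--     return steps_matrix
-- ===== SOURCE B (Python) =====
-- def generate_steps_matrix(positions):
--     # Consume the targets as a stack from the right: pop the last target,
--     # pair it with the element now on top of the stack (origin 0 when empty),
--     # emit the rows back-to-front, then reverse the collected rows.
--     rest = list(positions)
--     out = []
--     while rest:
--         t = rest.pop()
--         prev = rest[-1] if rest else 0
--         out.append([abs(t - prev), 1 if t > prev else 0])
--     out.reverse()
--     return out
-- ===== Notes on version B (the rewrite author's own statement) =====
-- stated objective: alternative
-- what changed: Replaces A's left-to-right loop with a running current_position accumulator by a right-to-left stack consumption: pop each target off the end, pair it with the element now exposed on top of the stack, collect rows back-to-front and reverse once at the end.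
import Mathlib
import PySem

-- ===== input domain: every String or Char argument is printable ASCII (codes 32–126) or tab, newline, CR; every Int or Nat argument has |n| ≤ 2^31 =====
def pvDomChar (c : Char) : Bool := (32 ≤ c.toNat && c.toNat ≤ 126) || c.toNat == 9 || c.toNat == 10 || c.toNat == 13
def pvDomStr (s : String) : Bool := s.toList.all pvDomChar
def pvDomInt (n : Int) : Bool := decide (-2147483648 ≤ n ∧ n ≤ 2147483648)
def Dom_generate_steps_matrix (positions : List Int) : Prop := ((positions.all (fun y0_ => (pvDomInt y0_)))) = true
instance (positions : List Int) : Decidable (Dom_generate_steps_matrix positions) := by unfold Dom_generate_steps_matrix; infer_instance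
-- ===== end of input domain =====

-- B replaces A's left-to-right current_position accumulator loop with a right-to-left stack
-- consumption (pop the last target, pair with the new stack top, reverse at the end); objective: alternative.

-- ===== PORT A =====
-- accumulator-carrying fold over positions, state = (current_position, steps_matrix)
def generate_steps_matrix (positions : List Int) : List (List Int) :=
  (positions.foldl
    (fun (st : Int × List (List Int)) target_position =>
      let steps := (target_position - st.1).natAbs
      let direction : Int := if target_position > st.1 then 1 else 0
      (target_position, st.2 ++ [[(steps : Int), direction]]))
    (0, [])).2

-- ===== PORT B =====
-- the while loop: pop the last element of rest, pair it with the new top (0 when empty)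
def gsmLoop (rest : List Int) (out : List (List Int)) : List (List Int) :=
  match h : rest.getLast? with
  | none => out
  | some t =>
    let rest' := rest.dropLast
    let prev := rest'.getLast?.getD 0
    gsmLoop rest'
      (out ++ [[((t - prev).natAbs : Int), if t > prev then 1 else 0]])
termination_by rest.length
decreasing_by
  have : rest ≠ [] := by intro hn; simp [hn] at h
  simpa [List.length_dropLast] using Nat.sub_lt (List.length_pos_iff.mpr this) Nat.one_pos

def generate_steps_matrix_alt (positions : List Int) : List (List Int) :=
  (gsmLoop positions []).reverse

-- ===== PRECONDITION & SPEC =====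
def Spec_generate_steps_matrix (positions : List Int) (out : List (List Int)) : Prop := out = generate_steps_matrix_alt positions
instance (positions : List Int) (out : List (List Int)) : Decidable (Spec_generate_steps_matrix positions out) := by unfold Spec_generate_steps_matrix; infer_instance

-- ===== CLAIM (what is proved, stated in full; the proofs are below) =====
def Claim_equal_generate_steps_matrix : Prop := ∀ (positions : List Int), Dom_generate_steps_matrix positions → Spec_generate_steps_matrix positions (generate_steps_matrix positions)

-- ===== LEMMAS AND PROOFS =====

-- the common row function and the reference matrix (proof-side only)
def gsmRow (p t : Int) : List Int := [((t - p).natAbs : Int), if t > p then 1 else 0]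

def gsmRef (c : Int) (xs : List Int) : List (List Int) :=
  List.zipWith gsmRow (c :: xs) xs

-- A's fold from state (c, acc) produces acc ++ the reference matrix rebased at c
theorem gsm_fold_eq (positions : List Int) (c : Int) (acc : List (List Int)) :
    (positions.foldl
      (fun (st : Int × List (List Int)) target_position =>
        let steps := (target_position - st.1).natAbs
        let direction : Int := if target_position > st.1 then 1 else 0
        (target_position, st.2 ++ [[(steps : Int), direction]]))
      (c, acc)).2
    = acc ++ gsmRef c positions := by
  induction positions generalizing c acc with
  | nil => simp [gsmRef]
  | cons x xs ih =>
    simp only [List.foldl_cons, gsmRef, List.zipWith]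
    rw [ih]
    simp [gsmRef, gsmRow]

-- appending one target extends the reference matrix by one row paired with the old last target
theorem gsmRef_snoc (ys : List Int) (t c : Int) :
    gsmRef c (ys ++ [t]) = gsmRef c ys ++ [gsmRow (ys.getLast?.getD c) t] := by
  induction ys generalizing c with
  | nil => simp [gsmRef]
  | cons y ys ih =>
    simp only [gsmRef, List.cons_append, List.zipWith] at *
    rw [ih y]
    cases ys with
    | nil => simp
    | cons a as =>
      obtain ⟨z, hz⟩ := Option.isSome_iff_exists.mp (List.getLast?_isSome.mpr (List.cons_ne_nil a as))
      simp [hz]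

-- loop invariant: the stack loop emits the reference matrix reversed, after out
theorem gsmLoop_eq (rest : List Int) (out : List (List Int)) :
    gsmLoop rest out = out ++ (gsmRef 0 rest).reverse := by
  induction rest using List.reverseRecOn generalizing out with
  | nil => simp [gsmLoop, gsmRef]
  | append_singleton ys t ih =>
    rw [gsmLoop]
    split
    · rename_i h
      simp at h
    · rename_i t1 h
      rw [List.getLast?_concat] at h
      injection h with h
      subst h
      rw [List.dropLast_concat, ih, gsmRef_snoc]
      simp [gsmRow]

-- ===== VERDICT (by name: the statement is the Claim_ definition above) =====
theorem generate_steps_matrix_spec : Claim_equal_generate_steps_matrix := by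
  intro positions _
  unfold Spec_generate_steps_matrix generate_steps_matrix generate_steps_matrix_alt
  rw [gsm_fold_eq, gsmLoop_eq]
  simp
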